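-- pv_equiv track=rewrite | github.com/RomanOdokienko/cybersecurity | scripts/audit_site.py | detect_remarketing_signals
-- ===== SOURCE A (Python) =====
-- def detect_remarketing_signals(html_pages):
--     signals = {
--         'vk_pixel': False,
--         'meta_pixel': False,
--         'google_ads_remarketing': False,
--     }
--     for html in html_pages:
--         low = (html or '').lower()
--         if not low:
--             continue
--         if 'vk.com/rtrg' in low or 'vk.rtrg' in low or 'vk_retargeting' in low:
--             signals['vk_pixel'] = True
--         if 'fbq(' in low or 'facebook.com/tr' in low or 'connect.facebook.net/en_us/fbevents' in low:
--             signals['meta_pixel'] = True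
--         if 'googletagmanager.com/gtag/js' in low and 'aw-' in low:
--             signals['google_ads_remarketing'] = True
--         if 'googleadservices.com/pagead/conversion' in low:
--             signals['google_ads_remarketing'] = True
--     signals['found'] = signals['vk_pixel'] or signals['meta_pixel'] or signals['google_ads_remarketing']
--     return signals
-- ===== SOURCE B (Python) =====
-- def detect_remarketing_signals(html_pages):
--     lows = [(html or '').lower() for html in html_pages]
--     vk = any('vk.com/rtrg' in low or 'vk.rtrg' in low or 'vk_retargeting' in low
--              for low in lows)
--     meta = any('fbq(' in low or 'facebook.com/tr' in low
--                or 'connect.facebook.net/en_us/fbevents' in low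
--                for low in lows)
--     google = any(('googletagmanager.com/gtag/js' in low and 'aw-' in low)
--                  or 'googleadservices.com/pagead/conversion' in low
--                  for low in lows)
--     return {
--         'vk_pixel': vk,
--         'meta_pixel': meta,
--         'google_ads_remarketing': google,
--         'found': vk or meta or google,
--     }
-- ===== Notes on version B (the rewrite author's own statement) =====
-- stated objective: idiomatic
-- what changed: Replaces the single pages-outer sweep over a mutable signals dict by three independent signal-outer any() scans over the lowercased pages, building the result dict in one literal.
import Mathlib
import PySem

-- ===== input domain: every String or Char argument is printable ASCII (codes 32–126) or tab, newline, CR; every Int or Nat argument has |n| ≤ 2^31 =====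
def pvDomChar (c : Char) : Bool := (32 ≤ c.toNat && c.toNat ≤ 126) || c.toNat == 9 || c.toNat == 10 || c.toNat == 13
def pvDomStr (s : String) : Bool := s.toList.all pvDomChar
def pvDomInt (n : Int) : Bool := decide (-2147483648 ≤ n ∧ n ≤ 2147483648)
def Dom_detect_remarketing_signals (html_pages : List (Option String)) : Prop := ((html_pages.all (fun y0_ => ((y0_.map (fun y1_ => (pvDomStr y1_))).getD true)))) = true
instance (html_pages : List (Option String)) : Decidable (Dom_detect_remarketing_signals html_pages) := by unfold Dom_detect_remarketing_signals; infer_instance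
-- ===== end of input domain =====

-- B replaces A's single pages-outer sweep over a mutable signals dict by three
-- independent signal-outer any-scans over the lowercased pages (idiomatic decomposition).


-- ===== PORT A =====
-- the loop body: the three fixed-key dict slots are the three components of the state
def pvStepA (s : Bool × Bool × Bool) (html : Option String) : Bool × Bool × Bool :=
  let low := PySem.Str.lower (html.getD "")
  if low = "" then s
  else
    let s1 := if PySem.Str.isIn "vk.com/rtrg" low || PySem.Str.isIn "vk.rtrg" low ||
                 PySem.Str.isIn "vk_retargeting" low then (true, s.2.1, s.2.2) else s
    let s2 := if PySem.Str.isIn "fbq(" low || PySem.Str.isIn "facebook.com/tr" low ||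
                 PySem.Str.isIn "connect.facebook.net/en_us/fbevents" low then (s1.1, true, s1.2.2) else s1
    let s3 := if PySem.Str.isIn "googletagmanager.com/gtag/js" low &&
                 PySem.Str.isIn "aw-" low then (s2.1, s2.2.1, true) else s2
    if PySem.Str.isIn "googleadservices.com/pagead/conversion" low then (s3.1, s3.2.1, true) else s3

def detect_remarketing_signals (html_pages : List (Option String)) : List (String × Bool) :=
  let s := html_pages.foldl pvStepA (false, false, false)
  [("vk_pixel", s.1), ("meta_pixel", s.2.1), ("google_ads_remarketing", s.2.2),
   ("found", s.1 || s.2.1 || s.2.2)]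

-- ===== PORT B =====
def pvLow (html : Option String) : String := PySem.Str.lower (html.getD "")

def pvVkPred (low : String) : Bool :=
  PySem.Str.isIn "vk.com/rtrg" low || PySem.Str.isIn "vk.rtrg" low ||
  PySem.Str.isIn "vk_retargeting" low

def pvMetaPred (low : String) : Bool :=
  PySem.Str.isIn "fbq(" low || PySem.Str.isIn "facebook.com/tr" low ||
  PySem.Str.isIn "connect.facebook.net/en_us/fbevents" low

def pvGooglePred (low : String) : Bool :=
  (PySem.Str.isIn "googletagmanager.com/gtag/js" low && PySem.Str.isIn "aw-" low) ||
  PySem.Str.isIn "googleadservices.com/pagead/conversion" low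

def detect_remarketing_signals_alt (html_pages : List (Option String)) : List (String × Bool) :=
  let lows := html_pages.map pvLow
  let vk := lows.any pvVkPred
  let metaP := lows.any pvMetaPred
  let google := lows.any pvGooglePred
  [("vk_pixel", vk), ("meta_pixel", metaP), ("google_ads_remarketing", google),
   ("found", vk || metaP || google)]

-- ===== PRECONDITION & SPEC =====
def Spec_detect_remarketing_signals (html_pages : List (Option String)) (out : List (String × Bool)) : Prop := out = detect_remarketing_signals_alt html_pages
instance (html_pages : List (Option String)) (out : List (String × Bool)) : Decidable (Spec_detect_remarketing_signals html_pages out) := by unfold Spec_detect_remarketing_signals; infer_instance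

-- ===== CLAIM (what is proved, stated in full; the proofs are below) =====
def Claim_equal_detect_remarketing_signals : Prop := ∀ (html_pages : List (Option String)), Dom_detect_remarketing_signals html_pages → Spec_detect_remarketing_signals html_pages (detect_remarketing_signals html_pages)

-- ===== LEMMAS AND PROOFS =====
theorem pvStep_bools (s : Bool × Bool × Bool) (c1 c2 c3 c4 : Bool) :
    (let s1 := if c1 then (true, s.2.1, s.2.2) else s
     let s2 := if c2 then (s1.1, true, s1.2.2) else s1
     let s3 := if c3 then (s2.1, s2.2.1, true) else s2
     if c4 then (s3.1, s3.2.1, true) else s3)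
    = (s.1 || c1, s.2.1 || c2, s.2.2 || (c3 || c4)) := by
  cases c1 <;> cases c2 <;> cases c3 <;> cases c4 <;> simp

theorem pvStepA_eq (s : Bool × Bool × Bool) (html : Option String) :
    pvStepA s html = (s.1 || pvVkPred (pvLow html), s.2.1 || pvMetaPred (pvLow html),
                      s.2.2 || pvGooglePred (pvLow html)) := by
  unfold pvStepA pvLow pvVkPred pvMetaPred pvGooglePred
  by_cases h : PySem.Str.lower (html.getD "") = ""
  · have e : ∀ (c : Char) (cs : List Char), PySem.Chars.isIn (c :: cs) [] = false := by
      intro c cs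
      rw [PySem.Chars.isIn_eq_false_iff]
      simp
    simp [h, e]
  · rw [if_neg h]
    exact pvStep_bools s _ _ _ _

theorem pvFold_eq (l : List (Option String)) (s : Bool × Bool × Bool) :
    l.foldl pvStepA s = (s.1 || (l.map pvLow).any pvVkPred, s.2.1 || (l.map pvLow).any pvMetaPred,
                         s.2.2 || (l.map pvLow).any pvGooglePred) := by
  induction l generalizing s with
  | nil => simp
  | cons p t ih => simp [pvStepA_eq, ih, Bool.or_assoc]

-- ===== VERDICT (by name: the statement is the Claim_ definition above) =====
theorem detect_remarketing_signals_spec : Claim_equal_detect_remarketing_signals := by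
  intro html_pages _
  unfold Spec_detect_remarketing_signals detect_remarketing_signals detect_remarketing_signals_alt
  simp [pvFold_eq]
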